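-- pv_equiv track=rewrite | github.com/UWPCE-PythonCert/IntroPython-2017 | students/danwoj/Session11/generators.py | soi
-- ===== SOURCE A (Python) =====
-- def soi(start, stop):
--     '''
--     This is my Sum of Integers generator function
--     '''
--     i = start
--     for j in range(stop):
--         yield i
--         if j == 0:
--             i += 1
--         else:
--             i += j+1
-- ===== SOURCE B (Python) =====
-- def soi(start, stop):
--     '''
--     This is my Sum of Integers generator function
--     '''
--     # closed form: the j-th yielded value is start plus the j-th triangular number
--     for j in range(stop):
--         yield start + j * (j + 1) // 2
-- ===== Notes on version B (the rewrite author's own statement) =====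
-- stated objective: simpler
-- what changed: B replaces A's running accumulator with its j==0 special-case branch by yielding the closed-form triangular number start + j*(j+1)//2 for each j.
import Mathlib
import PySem

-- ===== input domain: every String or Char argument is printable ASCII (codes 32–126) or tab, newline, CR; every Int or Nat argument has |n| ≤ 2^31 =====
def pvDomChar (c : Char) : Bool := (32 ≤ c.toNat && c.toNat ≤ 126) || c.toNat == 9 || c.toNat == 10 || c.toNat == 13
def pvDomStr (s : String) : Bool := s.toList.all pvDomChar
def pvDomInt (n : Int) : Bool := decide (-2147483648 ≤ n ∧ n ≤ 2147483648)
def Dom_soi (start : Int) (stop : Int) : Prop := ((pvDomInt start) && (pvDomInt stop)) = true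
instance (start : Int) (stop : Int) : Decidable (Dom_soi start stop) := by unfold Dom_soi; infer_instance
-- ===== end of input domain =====

-- B yields the closed-form triangular number per index instead of A's running accumulator with its j==0 branch (simpler).

-- ===== PORT A =====
def soi (start : Int) (stop : Int) : List Int :=
  ((PySem.List.pyRange 0 stop 1).foldl
    (fun (st : Int × List Int) j =>
      (if j == 0 then st.1 + 1 else st.1 + (j + 1), st.2 ++ [st.1]))
    (start, [])).2

-- ===== PORT B =====
def soi_alt (start : Int) (stop : Int) : List Int :=
  (PySem.List.pyRange 0 stop 1).map (fun j => start + PySem.Int.floordiv (j * (j + 1)) 2)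

-- ===== PRECONDITION & SPEC =====
def Spec_soi (start : Int) (stop : Int) (out : List Int) : Prop := out = soi_alt start stop
instance (start : Int) (stop : Int) (out : List Int) : Decidable (Spec_soi start stop out) := by unfold Spec_soi; infer_instance

-- ===== CLAIM (what is proved, stated in full; the proofs are below) =====
def Claim_equal_soi : Prop := ∀ (start : Int) (stop : Int), Dom_soi start stop → Spec_soi start stop (soi start stop)

-- ===== LEMMAS AND PROOFS =====
lemma tri_succ (m : Nat) : (m + 1) * (m + 2) / 2 = m * (m + 1) / 2 + (m + 1) := by
  have h : (m + 1) * (m + 2) = m * (m + 1) + 2 * (m + 1) := by ring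
  rw [h, Nat.add_mul_div_left _ _ (by omega : 0 < 2)]

lemma soi_key (start : Int) (n : Nat) :
    ((List.range n).map (fun k : Nat => (0 : Int) + (k : Int))).foldl
      (fun (st : Int × List Int) j =>
        (if j == 0 then st.1 + 1 else st.1 + (j + 1), st.2 ++ [st.1]))
      (start, [])
    = (start + ((n * (n + 1) / 2 : Nat) : Int),
       (List.range n).map (fun k => start + ((k * (k + 1) / 2 : Nat) : Int))) := by
  induction n with
  | zero => simp
  | succ m ih =>
    rw [List.range_succ, List.map_append, List.foldl_append, ih]
    simp only [List.map_append, List.map_cons, List.map_nil, List.foldl_cons, List.foldl_nil]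
    refine Prod.ext ?_ ?_
    · show (if ((0 : Int) + m == 0) then _ else _) = _
      by_cases hm : m = 0
      · subst hm; norm_num
      · have : ((0 : Int) + m == 0) = false := by
          simp [hm]
        rw [this]
        simp only [Bool.false_eq_true, if_false]
        rw [tri_succ]
        push_cast
        ring
    · simp

theorem soi_spec_aux (start stop : Int) : soi start stop = soi_alt start stop := by
  unfold soi soi_alt
  rw [PySem.List.pyRange_one, soi_key]
  simp [List.map_map, Function.comp]

-- ===== VERDICT (by name: the statement is the Claim_ definition above) =====
theorem soi_spec : Claim_equal_soi := by
  intro start stop _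
  unfold Spec_soi
  exact soi_spec_aux start stop
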